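-- pv_equiv track=rewrite | github.com/Tolmeton/Hegemonikon | 10_知性｜Nous/04_企画｜Boulēsis/14_忘却｜Lethe/experiments/structural_formula_v3.py | extract_subsequences
-- ===== SOURCE A (Python) =====
-- from collections import Counter, defaultdict
--
-- def extract_subsequences(
--     classified_seqs: list[list[str]],
--     min_len: int = 3,
--     max_len: int = 7,
--     min_freq: int = 50,
-- ) -> dict[str, list[int]]:
--     """全 CCL テキストから連続部分列を抽出し、頻度でフィルタ。
--
--     Returns: {pattern_string: [function_indices_containing_it]}
--     各 function に対して各 pattern を1度だけカウント (重複なし)。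
--     """
--     subseq_to_indices: dict[str, set[int]] = defaultdict(set)
--     for idx, seq in enumerate(classified_seqs):
--         seen: set[str] = set()
--         for n in range(min_len, min(max_len + 1, len(seq) + 1)):
--             for i in range(len(seq) - n + 1):
--                 s = " ".join(seq[i:i + n])
--                 if s not in seen:
--                     seen.add(s)
--                     subseq_to_indices[s].add(idx)
--     return {
--         s: sorted(idxs)
--         for s, idxs in subseq_to_indices.items()
--         if len(idxs) >= min_freq
--     }
-- ===== SOURCE B (Python) =====
-- def extract_subsequences(
--     classified_seqs,
--     min_len=3,
--     max_len=7,
--     min_freq=50,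
-- ):
--     """Incremental sliding-window variant: windows are grown one token at a
--     time (no per-window slicing/joining), per-function dedup via dict.fromkeys,
--     and indices are appended to already-sorted lists (no sets, no final sort)."""
--     pattern_to_indices = {}
--     for idx, seq in enumerate(classified_seqs):
--         hi = min(max_len, len(seq))
--         if min_len > hi:
--             continue  # no admissible window length for this function
--         patterns = []
--         cur = list(seq)  # joined windows of length 1
--         for n in range(1, hi + 1):
--             if n >= min_len:
--                 patterns.extend(cur)
--             cur = [c + " " + t for c, t in zip(cur, seq[n:])]
--         for s in dict.fromkeys(patterns):
--             if s in pattern_to_indices: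
--                 pattern_to_indices[s].append(idx)
--             else:
--                 pattern_to_indices[s] = [idx]
--     return {s: idxs for s, idxs in pattern_to_indices.items() if len(idxs) >= min_freq}
-- ===== Notes on version B (the rewrite author's own statement) =====
-- stated objective: alternative
-- what changed: B swaps the slice-and-join inner loop for incrementally grown window strings (each length-(n+1) window is the length-n window plus one token), skips functions whose length admits no window, dedups per function with one dict.fromkeys pass instead of an inline seen-set test, and replaces the dict of sets plus final sorted() by a dict of lists to which each function index is appended exactly once, so the lists are sorted by construction.
-- outside the precondition, e.g. on extract_subsequences([['a']], 0, 1, 1): A returns {'': [0], 'a': [0]}, B returns {'a': [0]}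
import Mathlib
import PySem

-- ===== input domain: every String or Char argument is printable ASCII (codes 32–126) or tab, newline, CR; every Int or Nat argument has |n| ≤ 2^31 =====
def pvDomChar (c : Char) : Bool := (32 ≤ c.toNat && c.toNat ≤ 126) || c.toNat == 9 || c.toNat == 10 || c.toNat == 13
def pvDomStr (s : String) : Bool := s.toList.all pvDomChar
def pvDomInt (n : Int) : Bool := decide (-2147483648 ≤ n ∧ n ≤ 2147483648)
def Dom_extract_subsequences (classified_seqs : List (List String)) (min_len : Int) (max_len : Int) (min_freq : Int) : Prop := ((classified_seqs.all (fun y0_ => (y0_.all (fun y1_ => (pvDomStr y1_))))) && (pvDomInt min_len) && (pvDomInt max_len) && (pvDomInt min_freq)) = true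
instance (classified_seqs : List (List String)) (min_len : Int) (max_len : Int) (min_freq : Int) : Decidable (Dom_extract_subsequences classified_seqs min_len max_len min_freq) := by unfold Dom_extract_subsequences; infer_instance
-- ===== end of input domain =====

-- One line: B grows each window string incrementally instead of re-joining every slice, dedups per
-- function with dict.fromkeys, and appends indices to plain lists instead of sets + final sorted().

-- ===== PORT A =====
def extract_subsequences (classified_seqs : List (List String)) (min_len : Int) (max_len : Int) (min_freq : Int) : List (String × List Int) :=
  let d := (PySem.List.enumerate classified_seqs 0).foldl
    (fun (d : PySem.Dict String (PySem.Set Int)) p =>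
      let idx := p.1
      let seq := p.2
      let st := (PySem.List.pyRange min_len (min (max_len + 1) ((seq.length : Int) + 1)) 1).foldl
        (fun (st : PySem.Set String × PySem.Dict String (PySem.Set Int)) n =>
          (PySem.List.pyRange 0 ((seq.length : Int) - n + 1) 1).foldl
            (fun st i =>
              let s := PySem.Str.join " " (PySem.List.slice seq (some i) (some (i + n)))
              if PySem.Set.contains st.1 s then st
              else (PySem.Set.add st.1 s, PySem.Dict.modify st.2 s PySem.Set.empty (fun v => PySem.Set.add v idx)))
            st)
        (PySem.Set.empty, d)
      st.2)
    PySem.Dict.empty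
  (d.items.filter (fun p => min_freq ≤ PySem.Set.len p.2)).map
    (fun p => (p.1, PySem.List.sorted p.2 (fun x => x) false))

-- ===== PORT B =====
def extract_subsequences_alt (classified_seqs : List (List String)) (min_len : Int) (max_len : Int) (min_freq : Int) : List (String × List Int) :=
  let d := (PySem.List.enumerate classified_seqs 0).foldl
    (fun (d : PySem.Dict String (List Int)) p =>
      let idx := p.1
      let seq := p.2
      let hi := min max_len (seq.length : Int)
      if hi < min_len then d
      else
        let pc := (PySem.List.pyRange 1 (hi + 1) 1).foldl
          (fun (pc : List String × List String) n =>
            (if min_len ≤ n then pc.1 ++ pc.2 else pc.1,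
             (pc.2.zip (PySem.List.slice seq (some n) none)).map (fun q => q.1 ++ " " ++ q.2)))
          ([], seq)
        (PySem.List.dedup pc.1).foldl
          (fun d s =>
            if d.contains s then d.insert s (d.getD s [] ++ [idx])
            else d.insert s [idx])
          d)
    PySem.Dict.empty
  d.items.filter (fun p => min_freq ≤ (p.2.length : Int))

-- ===== PRECONDITION & SPEC =====
-- Pre_ restricts to the natural domain of positive pattern lengths: when min_len ≤ 0 (and the
-- range min_len..max_len is nonempty) the requested subsequence length is meaningless and A emits
-- an empty-string pattern per function (an artefact of range/join on empty slices), while B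
-- naturally starts at window length 1; an empty length range or an empty input is admitted.
def Pre_extract_subsequences (classified_seqs : List (List String)) (min_len : Int) (max_len : Int) (min_freq : Int) : Prop := 1 ≤ min_len ∨ max_len < min_len ∨ classified_seqs = []
instance (classified_seqs : List (List String)) (min_len : Int) (max_len : Int) (min_freq : Int) : Decidable (Pre_extract_subsequences classified_seqs min_len max_len min_freq) := by unfold Pre_extract_subsequences; infer_instance
def pvWitness_extract_subsequences : List (List String) × Int × Int × Int := ([["a", "b"], ["b", "a"], ["a", "b"]], 1, 2, 2)

def Spec_extract_subsequences (classified_seqs : List (List String)) (min_len : Int) (max_len : Int) (min_freq : Int) (out : List (String × List Int)) : Prop := out = extract_subsequences_alt classified_seqs min_len max_len min_freq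
instance (classified_seqs : List (List String)) (min_len : Int) (max_len : Int) (min_freq : Int) (out : List (String × List Int)) : Decidable (Spec_extract_subsequences classified_seqs min_len max_len min_freq out) := by unfold Spec_extract_subsequences; infer_instance

-- ===== CLAIM (what is proved, stated in full; the proofs are below) =====
def Claim_equal_extract_subsequences : Prop := ∀ (classified_seqs : List (List String)) (min_len : Int) (max_len : Int) (min_freq : Int), Dom_extract_subsequences classified_seqs min_len max_len min_freq → Pre_extract_subsequences classified_seqs min_len max_len min_freq → Spec_extract_subsequences classified_seqs min_len max_len min_freq (extract_subsequences classified_seqs min_len max_len min_freq)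

-- ===== LEMMAS AND PROOFS =====


theorem pv_chars_join_snoc (sep t : List Char) (ws : List (List Char)) (hw : ws ≠ []) :
    PySem.Chars.join sep (ws ++ [t]) = PySem.Chars.join sep ws ++ sep ++ t := by
  induction ws with
  | nil => exact absurd rfl hw
  | cons x r ih =>
    cases r with
    | nil => simp [PySem.Chars.join_cons_cons, PySem.Chars.join_singleton]
    | cons y r' =>
      simp only [List.cons_append] at ih ⊢
      rw [PySem.Chars.join_cons_cons, ih (by simp), PySem.Chars.join_cons_cons]
      simp [List.append_assoc]

theorem pv_str_eq_of_toList (s t : String) (h : s.toList = t.toList) : s = t := by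
  calc s = String.ofList s.toList := by simp
    _ = String.ofList t.toList := by rw [h]
    _ = t := by simp

theorem pv_join_snoc (w : List String) (t : String) (hw : w ≠ []) :
    PySem.Str.join " " (w ++ [t]) = PySem.Str.join " " w ++ " " ++ t := by
  apply pv_str_eq_of_toList
  simp only [PySem.Str.join, String.toList_append, List.map_append, List.map_singleton]
  rw [pv_chars_join_snoc _ _ _ (by simpa using hw)]
  simp

theorem pv_filter_discard {q : String → Bool} (l : List String) (s : String) (hq : q s = false) :
    (PySem.Set.discard l s).filter q = l.filter q := by
  unfold PySem.Set.discard
  rw [List.filter_filter]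
  apply List.filter_congr
  intro a _
  by_cases h : a = s
  · subst h; simp [hq]
  · simp [h]

theorem pv_seen_fold {γ : Type} (g : γ → String → γ) (P : List String)
    (seen : PySem.Set String) (d : γ) :
    P.foldl (fun st s => if PySem.Set.contains st.1 s then st
        else (PySem.Set.add st.1 s, g st.2 s)) (seen, d)
      = (PySem.Set.update seen P,
         ((PySem.Set.ofList P).filter (fun y => !(PySem.Set.contains seen y))).foldl g d) := by
  induction P generalizing seen d with
  | nil => simp [PySem.Set.update_nil, PySem.Set.ofList_nil]
  | cons s P ih =>
    rw [List.foldl_cons, PySem.Set.update_cons, PySem.Set.ofList_cons]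
    by_cases h : PySem.Set.contains seen s = true
    · simp only [h, if_pos]
      rw [ih]
      have hmem : s ∈ seen := (PySem.Set.contains_iff _ _).mp h
      have hadd : PySem.Set.add seen s = seen := PySem.Set.add_of_mem hmem
      rw [hadd, List.filter_cons_of_neg (by simp [hmem]), pv_filter_discard _ _ (by simp [hmem])]
    · simp only [h, if_neg, Bool.false_eq_true, not_false_iff]
      rw [ih]
      have hs : s ∉ seen := fun hmem => h ((PySem.Set.contains_iff _ _).mpr hmem)
      have hadd : PySem.Set.add seen s = seen ++ [s] := PySem.Set.add_of_not_mem hs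
      congr 1
      rw [List.filter_cons_of_pos (by simp [hs]), List.foldl_cons]
      unfold PySem.Set.discard
      rw [List.filter_filter]
      congr 1
      apply List.filter_congr
      intro a _
      by_cases ha : a = s
      · subst ha; simp [hadd]
      · simp [hadd, ha]

def pvGA (idx : Int) (d : PySem.Dict String (PySem.Set Int)) (s : String) : PySem.Dict String (PySem.Set Int) :=
  PySem.Dict.modify d s PySem.Set.empty (fun v => PySem.Set.add v idx)

def pvGB (idx : Int) (d : PySem.Dict String (List Int)) (s : String) : PySem.Dict String (List Int) :=
  if d.contains s then d.insert s (d.getD s [] ++ [idx]) else d.insert s [idx]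

def pvInv (bound : Int) (d : PySem.Dict String (List Int)) : Prop :=
  d.keys.Nodup ∧ ∀ p ∈ d.items, p.2.Pairwise (· < ·) ∧ ∀ x ∈ p.2, x < bound

def pvInvR (idx : Int) (D : List String) (d : PySem.Dict String (List Int)) : Prop :=
  d.keys.Nodup ∧ (∀ p ∈ d.items, p.2.Pairwise (· < ·) ∧ ∀ x ∈ p.2, x < idx + 1)
    ∧ (∀ s ∈ D, ∀ x ∈ d.getD s [], x < idx)

theorem pv_getD_cases (d : PySem.Dict String (List Int)) (s : String) :
    d.getD s [] = [] ∨ (s, d.getD s []) ∈ d.items := by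
  cases hc : d.contains s with
  | false => exact Or.inl (PySem.Dict.getD_of_not_contains d [] hc)
  | true =>
    rw [PySem.Dict.contains_eq_isSome_get?] at hc
    obtain ⟨v, hv⟩ := Option.isSome_iff_exists.mp hc
    right
    rw [PySem.Dict.getD_of_get?_eq_some d [] hv]
    exact PySem.Dict.mem_items_of_get?_eq_some d hv

theorem pv_step_eq (idx : Int) (d : PySem.Dict String (List Int)) (s : String)
    (hlt : ∀ x ∈ d.getD s [], x < idx) :
    pvGA idx d s = d.insert s (d.getD s [] ++ [idx]) ∧ pvGB idx d s = d.insert s (d.getD s [] ++ [idx]) := by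
  have hnm : idx ∉ d.getD s [] := fun hm => absurd (hlt idx hm) (lt_irrefl idx)
  constructor
  · show PySem.Dict.modify d s PySem.Set.empty (fun v => PySem.Set.add v idx) = _
    unfold PySem.Dict.modify
    rw [show (PySem.Set.empty : PySem.Set Int) = ([] : List Int) from rfl]
    simp only [PySem.Set.add_of_not_mem hnm]
  · unfold pvGB
    cases hc : d.contains s with
    | false => rw [PySem.Dict.getD_of_not_contains d [] hc]; simp
    | true => simp

theorem pv_round_aux (idx : Int) (D : List String) (hD : D.Nodup) :
    ∀ d, pvInvR idx D d →
      D.foldl (pvGA idx) d = D.foldl (pvGB idx) d ∧ pvInvR idx [] (D.foldl (pvGB idx) d) := by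
  induction D with
  | nil => intro d h; exact ⟨rfl, h.1, h.2.1, by simp⟩
  | cons s D' ih =>
    intro d h
    obtain ⟨hnd, hitems, hgetD⟩ := h
    have hsD' : s ∉ D' := (List.nodup_cons.mp hD).1
    have hlt : ∀ x ∈ d.getD s [], x < idx := hgetD s (by simp)
    obtain ⟨hA, hB⟩ := pv_step_eq idx d s hlt
    set d' := d.insert s (d.getD s [] ++ [idx]) with hd'
    have hvp : (d.getD s []).Pairwise (· < ·) := by
      rcases pv_getD_cases d s with hnil | hmem
      · rw [hnil]; exact List.Pairwise.nil
      · exact (hitems _ hmem).1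
    have hinv' : pvInvR idx D' d' := by
      refine ⟨PySem.Dict.nodup_keys_insert d s _ hnd, ?_, ?_⟩
      · intro p hp
        rcases (PySem.Dict.mem_items_insert d s _ p).mp hp with hps | ⟨hpd, _⟩
        · subst hps
          constructor
          · rw [List.pairwise_append]
            exact ⟨hvp, by simp, fun a ha b hb => by
              simp at hb; subst hb; exact hlt a ha⟩
          · intro x hx
            rcases List.mem_append.mp hx with hx | hx
            · exact lt_trans (hlt x hx) (by omega)
            · simp at hx; omega
        · exact hitems p hpd
      · intro s' hs' x hx
        have hne : s' ≠ s := fun he => hsD' (he ▸ hs')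
        rw [hd', PySem.Dict.getD_insert_of_ne d _ _ hne] at hx
        exact hgetD s' (by simp [hs']) x hx
    have := ih (List.nodup_cons.mp hD).2 d' hinv'
    rw [List.foldl_cons, List.foldl_cons, hA, hB]
    exact this

theorem pv_round (idx : Int) (D : List String) (hD : D.Nodup)
    (d : PySem.Dict String (List Int)) (hInv : pvInv idx d) :
    D.foldl (pvGA idx) d = D.foldl (pvGB idx) d ∧ pvInv (idx + 1) (D.foldl (pvGB idx) d) := by
  have hR : pvInvR idx D d := by
    refine ⟨hInv.1, fun p hp => ⟨(hInv.2 p hp).1, fun x hx => lt_trans ((hInv.2 p hp).2 x hx) (by omega)⟩, ?_⟩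
    intro s _ x hx
    rcases pv_getD_cases d s with hnil | hmem
    · rw [hnil] at hx; exact absurd hx (List.not_mem_nil)
    · exact (hInv.2 _ hmem).2 x hx
  obtain ⟨heq, h1, h2, _⟩ := pv_round_aux idx D hD d hR
  exact ⟨heq, h1, h2⟩

def pvW (seq : List String) (n : Nat) : List String :=
  (List.range (seq.length + 1 - n)).map (fun i => PySem.Str.join " " ((seq.drop i).take n))

theorem pv_join_single (x : String) : PySem.Str.join " " [x] = x := by
  apply pv_str_eq_of_toList
  simp [PySem.Str.join, PySem.Chars.join_singleton]

theorem pvW_one (seq : List String) : pvW seq 1 = seq := by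
  apply List.ext_getElem
  · simp [pvW]
  · intro i h1 h2
    simp only [pvW, List.getElem_map, List.getElem_range]
    have h0 : 0 < (seq.drop i).length := by simpa using h2
    have : (seq.drop i).take 1 = [seq[i]] := by
      rw [show (1 : Nat) = 0 + 1 from rfl, List.take_add_one, List.take_zero,
          List.getElem?_eq_getElem h0]
      simp
    rw [this, pv_join_single]

theorem pvW_succ_elem (seq : List String) (n i : Nat) (h1 : 1 ≤ n) (hi : i + n < seq.length) :
    PySem.Str.join " " ((seq.drop i).take (n+1))
      = PySem.Str.join " " ((seq.drop i).take n) ++ " " ++ seq[i + n] := by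
  have hlen : (seq.drop i).length = seq.length - i := List.length_drop ..
  have hn : n < (seq.drop i).length := by omega
  rw [List.take_add_one]
  have : (seq.drop i)[n]? = some seq[i + n] := by
    rw [List.getElem?_eq_getElem hn]
    congr 1
    rw [List.getElem_drop]
  rw [this]
  simp only [Option.toList_some]
  rw [pv_join_snoc]
  intro hc
  have := congrArg List.length hc
  simp at this
  omega

def pvStepB (seq : List String) (min_len : Int) (pc : List String × List String) (n : Int) : List String × List String :=
  (if min_len ≤ n then pc.1 ++ pc.2 else pc.1,
   (pc.2.zip (PySem.List.slice seq (some n) none)).map (fun q => q.1 ++ " " ++ q.2))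

theorem pvW_step (seq : List String) (n : Nat) (h1 : 1 ≤ n) (hn : n ≤ seq.length) :
    ((pvW seq n).zip (PySem.List.slice seq (some (n : Int)) none)).map (fun q => q.1 ++ " " ++ q.2)
      = pvW seq (n+1) := by
  rw [PySem.List.slice_from_natCast]
  apply List.ext_getElem
  · simp [pvW]; omega
  · intro i hL hR
    have hlen : i + n < seq.length := by
      simp [pvW] at hL; omega
    simp only [List.getElem_map, List.getElem_zip, pvW, List.getElem_range, List.getElem_drop]
    rw [pvW_succ_elem seq n i h1 hlen]
    congr 2
    omega

theorem pv_fold_windows (seq : List String) (min_len : Int) (h1 : 1 ≤ min_len) :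
    ∀ j : Nat, j ≤ seq.length →
      (PySem.List.pyRange 1 ((j : Int) + 1) 1).foldl (pvStepB seq min_len) ([], seq)
        = ((PySem.List.pyRange min_len ((j : Int) + 1) 1).flatMap (fun n => pvW seq n.toNat),
           pvW seq (j + 1)) := by
  intro j
  induction j with
  | zero =>
    intro _
    rw [PySem.List.pyRange_one_eq_nil (by omega), PySem.List.pyRange_one_eq_nil (by omega)]
    simp [pvW_one]
  | succ j ih =>
    intro hj
    have hj' : j ≤ seq.length := by omega
    have hcast : ((j + 1 : Nat) : Int) + 1 = ((j : Int) + 1) + 1 := by push_cast; ring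
    rw [hcast, PySem.List.pyRange_one_succ_right (by omega), List.foldl_append, ih hj']
    rw [List.foldl_cons, List.foldl_nil]
    unfold pvStepB
    dsimp only
    refine Prod.ext ?_ ?_
    · by_cases hmn : min_len ≤ (j : Int) + 1
      · rw [if_pos hmn, PySem.List.pyRange_one_succ_right hmn, List.flatMap_append,
            List.flatMap_cons, List.flatMap_nil, List.append_nil,
            show ((j:Int)+1).toNat = j + 1 by omega]
      · rw [if_neg hmn, PySem.List.pyRange_one_eq_nil (by omega),
            PySem.List.pyRange_one_eq_nil (by omega)]
    · show ((pvW seq (j+1)).zip (PySem.List.slice seq (some ((j:Int)+1)) none)).map _ = pvW seq (j+1+1)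
      have : ((j : Int) + 1) = ((j + 1 : Nat) : Int) := by push_cast; ring
      rw [this, pvW_step seq (j+1) (by omega) hj]

def pvPatterns (seq : List String) (min_len max_len : Int) : List String :=
  (PySem.List.pyRange min_len (min (max_len + 1) ((seq.length : Int) + 1)) 1).flatMap
    (fun n => (PySem.List.pyRange 0 ((seq.length : Int) - n + 1) 1).map
      (fun i => PySem.Str.join " " (PySem.List.slice seq (some i) (some (i + n)))))

theorem pvPatterns_eq (seq : List String) (min_len max_len : Int) (h1 : 1 ≤ min_len) :
    pvPatterns seq min_len max_len
      = (PySem.List.pyRange min_len (min max_len (seq.length : Int) + 1) 1).flatMap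
          (fun n => pvW seq n.toNat) := by
  unfold pvPatterns
  have hmin : min (max_len + 1) ((seq.length : Int) + 1) = min max_len (seq.length : Int) + 1 := by
    omega
  rw [hmin, List.flatMap_def, List.flatMap_def]
  congr 1
  apply List.map_congr_left
  intro n hn
  rw [PySem.List.mem_pyRange_one] at hn
  have hn1 : 1 ≤ n := by omega
  have hnL : n ≤ (seq.length : Int) := by omega
  have hL : (seq.length : Int) - n + 1 = ((seq.length + 1 - n.toNat : Nat) : Int) := by
    rw [Int.natCast_sub (by omega)]
    push_cast
    omega
  rw [hL, PySem.List.pyRange_zero_natCast, List.map_map]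
  unfold pvW
  apply List.map_congr_left
  intro k hk
  rw [List.mem_range] at hk
  show PySem.Str.join " " (PySem.List.slice seq (some (k : Int)) (some ((k : Int) + n))) = _
  rw [show ((k : Int) + n) = ((k : Int) + (n.toNat : Int)) by omega,
      PySem.List.slice_natCast_add]

theorem pv_windows_eq (seq : List String) (min_len max_len : Int) (h1 : 1 ≤ min_len) :
    ((PySem.List.pyRange 1 (min max_len (seq.length : Int) + 1) 1).foldl (pvStepB seq min_len)
      ([], seq)).1 = pvPatterns seq min_len max_len := by
  rw [pvPatterns_eq seq min_len max_len h1]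
  by_cases hpos : 1 ≤ min max_len (seq.length : Int)
  · have hj : ((min max_len (seq.length : Int)).toNat : Int) = min max_len (seq.length : Int) :=
      Int.toNat_of_nonneg (by omega)
    rw [← hj, pv_fold_windows seq min_len h1 _ (by omega)]
  · rw [PySem.List.pyRange_one_eq_nil (by omega), PySem.List.pyRange_one_eq_nil (by omega)]
    rfl

def pvBodyA (min_len : Int) (max_len : Int) (d : PySem.Dict String (PySem.Set Int))
    (p : Int × List String) : PySem.Dict String (PySem.Set Int) :=
  let idx := p.1
  let seq := p.2
  let st := (PySem.List.pyRange min_len (min (max_len + 1) ((seq.length : Int) + 1)) 1).foldl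
    (fun (st : PySem.Set String × PySem.Dict String (PySem.Set Int)) n =>
      (PySem.List.pyRange 0 ((seq.length : Int) - n + 1) 1).foldl
        (fun st i =>
          let s := PySem.Str.join " " (PySem.List.slice seq (some i) (some (i + n)))
          if PySem.Set.contains st.1 s then st
          else (PySem.Set.add st.1 s, PySem.Dict.modify st.2 s PySem.Set.empty (fun v => PySem.Set.add v idx)))
        st)
    (PySem.Set.empty, d)
  st.2

def pvBodyB (min_len : Int) (max_len : Int) (d : PySem.Dict String (List Int))
    (p : Int × List String) : PySem.Dict String (List Int) :=
  let idx := p.1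
  let seq := p.2
  let hi := min max_len (seq.length : Int)
  if hi < min_len then d
  else
    let pc := (PySem.List.pyRange 1 (hi + 1) 1).foldl
      (fun (pc : List String × List String) n =>
        (if min_len ≤ n then pc.1 ++ pc.2 else pc.1,
         (pc.2.zip (PySem.List.slice seq (some n) none)).map (fun q => q.1 ++ " " ++ q.2)))
      ([], seq)
    (PySem.List.dedup pc.1).foldl
      (fun d s =>
        if d.contains s then d.insert s (d.getD s [] ++ [idx])
        else d.insert s [idx])
      d

theorem pv_foldl_flatMap {α β γ : Type} (l : List α) (g : α → List β) (f : γ → β → γ) (init : γ) :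
    l.foldl (fun acc a => (g a).foldl f acc) init = (l.flatMap g).foldl f init := by
  induction l generalizing init with
  | nil => rfl
  | cons a t ih => simp [List.flatMap_cons, List.foldl_append, ih]

theorem pv_flattenA (seq : List String) (idx min_len max_len : Int)
    (init : PySem.Set String × PySem.Dict String (PySem.Set Int)) :
    (PySem.List.pyRange min_len (min (max_len + 1) ((seq.length : Int) + 1)) 1).foldl
      (fun st n => (PySem.List.pyRange 0 ((seq.length : Int) - n + 1) 1).foldl
        (fun st i =>
          let s := PySem.Str.join " " (PySem.List.slice seq (some i) (some (i + n)))
          if PySem.Set.contains st.1 s then st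
          else (PySem.Set.add st.1 s, PySem.Dict.modify st.2 s PySem.Set.empty (fun v => PySem.Set.add v idx)))
        st) init
    = (pvPatterns seq min_len max_len).foldl
        (fun st s => if PySem.Set.contains st.1 s then st
          else (PySem.Set.add st.1 s, pvGA idx st.2 s)) init := by
  show _ = ((PySem.List.pyRange min_len (min (max_len + 1) ((seq.length : Int) + 1)) 1).flatMap
      (fun n => (PySem.List.pyRange 0 ((seq.length : Int) - n + 1) 1).map
        (fun i => PySem.Str.join " " (PySem.List.slice seq (some i) (some (i + n)))))).foldl
      (fun st s => if PySem.Set.contains st.1 s then st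
        else (PySem.Set.add st.1 s, pvGA idx st.2 s)) init
  refine Eq.trans (PySem.List.foldl_congr_mem _ _
      (fun st n => ((PySem.List.pyRange 0 ((seq.length : Int) - n + 1) 1).map
          (fun i => PySem.Str.join " " (PySem.List.slice seq (some i) (some (i + n))))).foldl
        (fun st s => if PySem.Set.contains st.1 s then st
          else (PySem.Set.add st.1 s, pvGA idx st.2 s)) st) _
      ?_) (pv_foldl_flatMap _ _ _ _)
  intro acc n _
  dsimp only
  rw [List.foldl_map]
  unfold pvGA PySem.Dict.modify
  rfl

theorem pv_bodyA_eq (min_len max_len : Int) (d : PySem.Dict String (PySem.Set Int))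
    (p : Int × List String) :
    pvBodyA min_len max_len d p
      = (PySem.Set.ofList (pvPatterns p.2 min_len max_len)).foldl (pvGA p.1) d := by
  unfold pvBodyA
  dsimp only
  rw [pv_flattenA p.2 p.1 min_len max_len (PySem.Set.empty, d),
      pv_seen_fold (pvGA p.1) _ PySem.Set.empty d]
  show (((PySem.Set.ofList (pvPatterns p.2 min_len max_len)).filter
      (fun y => !(PySem.Set.contains PySem.Set.empty y))).foldl (pvGA p.1) d) = _
  congr 1
  rw [show (PySem.Set.empty : PySem.Set String) = ([] : List String) from rfl]
  simp [PySem.Set.contains]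

theorem pv_bodyB_eq (min_len max_len : Int) (h1 : 1 ≤ min_len)
    (d : PySem.Dict String (List Int)) (p : Int × List String) :
    pvBodyB min_len max_len d p
      = (PySem.Set.ofList (pvPatterns p.2 min_len max_len)).foldl (pvGB p.1) d := by
  unfold pvBodyB
  dsimp only
  by_cases hlt : min max_len ((p.2.length : Nat) : Int) < min_len
  · rw [if_pos hlt, pvPatterns_eq p.2 min_len max_len h1,
        PySem.List.pyRange_one_eq_nil (by omega)]
    rfl
  · rw [if_neg hlt]
    rw [show (fun (pc : List String × List String) n =>
        (if min_len ≤ n then pc.1 ++ pc.2 else pc.1,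
         (pc.2.zip (PySem.List.slice p.2 (some n) none)).map (fun q => q.1 ++ " " ++ q.2)))
        = pvStepB p.2 min_len from rfl]
    rw [pv_windows_eq p.2 min_len max_len h1, PySem.List.dedup_eq_ofList]
    rfl

theorem pv_outer (min_len max_len : Int) (h1 : 1 ≤ min_len) :
    ∀ (cs : List (List String)) (k : Int) (d : PySem.Dict String (List Int)), pvInv k d →
      (PySem.List.enumerate cs k).foldl (pvBodyA min_len max_len) d
        = (PySem.List.enumerate cs k).foldl (pvBodyB min_len max_len) d
      ∧ pvInv (k + cs.length) ((PySem.List.enumerate cs k).foldl (pvBodyB min_len max_len) d) := by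
  intro cs
  induction cs with
  | nil =>
    intro k d h
    rw [PySem.List.enumerate_nil]
    exact ⟨rfl, by simpa using h⟩
  | cons seq rest ih =>
    intro k d h
    rw [PySem.List.enumerate_cons, List.foldl_cons, List.foldl_cons,
        pv_bodyA_eq, pv_bodyB_eq min_len max_len h1]
    obtain ⟨heq, hinv⟩ := pv_round k (PySem.Set.ofList (pvPatterns seq min_len max_len))
      (by rw [← PySem.List.dedup_eq_ofList]; exact PySem.List.nodup_dedup _) d h
    rw [heq]
    obtain ⟨e, hi⟩ := ih (k + 1) _ hinv
    refine ⟨e, ?_⟩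
    have hl : k + 1 + (rest.length : Int) = k + ((seq :: rest).length : Int) := by
      simp; ring
    rw [← hl]
    exact hi

theorem pv_main (classified_seqs : List (List String)) (min_len max_len min_freq : Int)
    (h1 : 1 ≤ min_len) :
    extract_subsequences classified_seqs min_len max_len min_freq
      = extract_subsequences_alt classified_seqs min_len max_len min_freq := by
  have hA : extract_subsequences classified_seqs min_len max_len min_freq
      = ((((PySem.List.enumerate classified_seqs 0).foldl (pvBodyA min_len max_len)
          PySem.Dict.empty).items.filter (fun p => min_freq ≤ PySem.Set.len p.2)).map
        (fun p => (p.1, PySem.List.sorted p.2 (fun x => x) false))) := rfl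
  have hB : extract_subsequences_alt classified_seqs min_len max_len min_freq
      = (((PySem.List.enumerate classified_seqs 0).foldl (pvBodyB min_len max_len)
          PySem.Dict.empty).items.filter (fun p => min_freq ≤ (p.2.length : Int))) := rfl
  rw [hA, hB]
  have hinv0 : pvInv 0 (PySem.Dict.empty : PySem.Dict String (List Int)) := by
    refine ⟨PySem.Dict.nodup_keys_empty, ?_⟩
    intro p hp
    simp [PySem.Dict.empty] at hp
  obtain ⟨heq, hinv⟩ := pv_outer min_len max_len h1 classified_seqs 0 PySem.Dict.empty hinv0
  rw [heq]
  have hfc : (fun (p : String × List Int) => decide (min_freq ≤ PySem.Set.len p.2))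
      = (fun p => decide (min_freq ≤ (p.2.length : Int))) := rfl
  rw [hfc]
  set dfin := (PySem.List.enumerate classified_seqs 0).foldl (pvBodyB min_len max_len)
      PySem.Dict.empty with hdfin
  have hmc : ∀ p ∈ dfin.items.filter (fun p => min_freq ≤ (p.2.length : Int)),
      (p.1, PySem.List.sorted p.2 (fun x => x) false) = p := by
    intro p hp
    have hp' := List.mem_of_mem_filter hp
    have hpw := (hinv.2 p hp').1
    exact Prod.ext rfl (PySem.List.sorted_eq_self_of_pairwise p.2 (fun x => x) (hpw.imp le_of_lt))
  rw [List.map_congr_left hmc]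
  simp

theorem pv_main_empty (classified_seqs : List (List String)) (min_len max_len min_freq : Int)
    (hgt : max_len < min_len) :
    extract_subsequences classified_seqs min_len max_len min_freq
      = extract_subsequences_alt classified_seqs min_len max_len min_freq := by
  have hbA : ∀ (d : PySem.Dict String (PySem.Set Int)) (p : Int × List String),
      pvBodyA min_len max_len d p = d := by
    intro d p
    unfold pvBodyA
    dsimp only
    rw [PySem.List.pyRange_one_eq_nil (by omega)]
    rfl
  have hbB : ∀ (d : PySem.Dict String (List Int)) (p : Int × List String),
      pvBodyB min_len max_len d p = d := by
    intro d p
    unfold pvBodyB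
    dsimp only
    rw [if_pos (by omega)]
  have hA : extract_subsequences classified_seqs min_len max_len min_freq
      = ((((PySem.List.enumerate classified_seqs 0).foldl (pvBodyA min_len max_len)
          PySem.Dict.empty).items.filter (fun p => min_freq ≤ PySem.Set.len p.2)).map
        (fun p => (p.1, PySem.List.sorted p.2 (fun x => x) false))) := rfl
  have hB : extract_subsequences_alt classified_seqs min_len max_len min_freq
      = (((PySem.List.enumerate classified_seqs 0).foldl (pvBodyB min_len max_len)
          PySem.Dict.empty).items.filter (fun p => min_freq ≤ (p.2.length : Int))) := rfl
  rw [hA, hB,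
      PySem.List.foldl_congr_mem _ _ (fun d _ => d) _ (fun acc x _ => hbA acc x),
      PySem.List.foldl_congr_mem _ _ (fun d _ => d) _ (fun acc x _ => hbB acc x),
      PySem.List.foldl_ignore]
  rfl

-- ===== VERDICT (by name: the statement is the Claim_ definition above) =====
theorem extract_subsequences_spec : Claim_equal_extract_subsequences := by
  intro cs ml xl mf _ hpre
  rcases hpre with h1 | hgt | hnil
  · exact pv_main cs ml xl mf h1
  · exact pv_main_empty cs ml xl mf hgt
  · subst hnil; rfl
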